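-- pv_equiv track=rewrite | github.com/gouravshaw2014/Automaton-Tools | Automata.py | convert
-- ===== SOURCE A (Python) =====
-- from collections import defaultdict, deque
--
-- def convert(T):
--     grouped = defaultdict(set)
--
--     for state, symbol, condition, next_states in T:
--         key = (state, symbol, condition)
--         grouped[key].update(next_states)
--
--     St = defaultdict(list)
--     for (state, symbol, condition), targets in grouped.items():
--         St[(state, symbol)].append((condition, targets))
--
--     # Optional: convert lists to tuples for consistent format
--     for key in St:
--         St[key] = tuple(St[key])
--
--     return dict(St)
-- ===== SOURCE B (Python) =====
-- def convert(T):
--     # Different decomposition: dedup the (state, symbol) keys first, then build each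
--     # group's value directly with comprehensions (first-appearance order throughout).
--     pairs = list(dict.fromkeys((state, symbol) for state, symbol, _c, _ns in T))
--     out = {}
--     for p in pairs:
--         rows = [(c, ns) for s, sy, c, ns in T if (s, sy) == p]
--         conds = list(dict.fromkeys(c for c, _ns in rows))
--         out[p] = tuple(
--             (c, {t for cc, ns in rows if cc == c for t in ns})
--             for c in conds)
--     return out
-- ===== Notes on version B (the rewrite author's own statement) =====
-- stated objective: alternative
-- what changed: A makes two sequential defaultdict grouping passes (triple-keyed sets, then regroup by pair) plus a tuple fix-up loop; B instead dedups the (state,symbol) keys up front and builds each group's value directly with filter/dict.fromkeys comprehensions over the input rows.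
import Mathlib
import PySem

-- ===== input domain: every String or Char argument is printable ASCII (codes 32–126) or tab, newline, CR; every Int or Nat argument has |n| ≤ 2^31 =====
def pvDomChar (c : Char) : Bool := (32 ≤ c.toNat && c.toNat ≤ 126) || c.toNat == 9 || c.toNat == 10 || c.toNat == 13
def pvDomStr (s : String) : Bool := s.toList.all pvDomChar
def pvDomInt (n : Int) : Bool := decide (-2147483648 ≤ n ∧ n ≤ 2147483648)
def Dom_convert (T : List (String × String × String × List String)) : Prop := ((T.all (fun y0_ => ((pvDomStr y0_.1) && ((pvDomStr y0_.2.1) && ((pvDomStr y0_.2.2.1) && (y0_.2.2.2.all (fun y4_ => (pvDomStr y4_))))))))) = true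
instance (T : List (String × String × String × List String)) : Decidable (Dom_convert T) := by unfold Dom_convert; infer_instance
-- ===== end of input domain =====

-- B replaces A's two sequential hash-grouping passes by deduplicating the (state,symbol)
-- keys up front and building each group's value directly with filter comprehensions
-- (objective: alternative decomposition, not faster).

-- ===== PORT A =====
-- grouped = defaultdict(set); for state,symbol,condition,ns in T: grouped[(state,symbol,condition)].update(ns)
-- St = defaultdict(list); for (state,symbol,condition),targets in grouped.items(): St[(state,symbol)].append((condition,targets))
-- the tuple(...) fix-up is the identity on the Lean side; return dict(St) = its items
def convert (T : List (String × String × String × List String)) : List (String × String × List (String × List String)) :=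
  let grouped : PySem.Dict (String × String × String) (PySem.Set String) :=
    T.foldl (fun g e => g.modify (e.1, e.2.1, e.2.2.1) PySem.Set.empty (fun s => PySem.Set.update s e.2.2.2)) PySem.Dict.empty
  let st : PySem.Dict (String × String) (List (String × PySem.Set String)) :=
    grouped.items.foldl (fun d q => d.modify (q.1.1, q.1.2.1) [] (fun l => l ++ [(q.1.2.2, q.2)])) PySem.Dict.empty
  st.items.map (fun q => (q.1.1, q.1.2, q.2))

-- ===== PORT B =====
-- pairs = list(dict.fromkeys(...)); per pair: rows by one filter, conds = dict.fromkeys,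
-- value = tuple((c, {t for cc,ns in rows if cc==c for t in ns}) for c in conds)
def convert_alt (T : List (String × String × String × List String)) : List (String × String × List (String × List String)) :=
  let pairs : List (String × String) := PySem.List.dedup (T.map (fun e => (e.1, e.2.1)))
  let out : PySem.Dict (String × String) (List (String × PySem.Set String)) :=
    pairs.foldl (fun out p =>
      let rows : List (String × List String) :=
        (T.filter (fun e => (e.1, e.2.1) == p)).map (fun e => (e.2.2.1, e.2.2.2))
      let conds : List String := PySem.List.dedup (rows.map (fun r => r.1))
      out.insert p (conds.map (fun c =>
        (c, PySem.Set.ofList ((rows.filter (fun r => r.1 == c)).flatMap (fun r => r.2)))))) PySem.Dict.empty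
  out.items.map (fun q => (q.1.1, q.1.2, q.2))

-- ===== PRECONDITION & SPEC =====
def Spec_convert (T : List (String × String × String × List String)) (out : List (String × String × List (String × List String))) : Prop := out = convert_alt T
instance (T : List (String × String × String × List String)) (out : List (String × String × List (String × List String))) : Decidable (Spec_convert T out) := by unfold Spec_convert; infer_instance

-- ===== CLAIM (what is proved, stated in full; the proofs are below) =====
def Claim_equal_convert : Prop := ∀ (T : List (String × String × String × List String)), Dom_convert T → Spec_convert T (convert T)

-- ===== LEMMAS AND PROOFS =====

-- getD of a fold of modify, keyed through `key`: the updates at key k are exactly those of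
-- the elements whose key is k, applied in order.
theorem pv_getD_foldl_modify_key {κ ν β : Type} [BEq κ] [LawfulBEq κ] [DecidableEq κ]
    (l : List β) (key : β → κ) (d0 : ν) (g : β → ν → ν) (d : PySem.Dict κ ν) (k : κ) :
    (l.foldl (fun d b => d.modify (key b) d0 (g b)) d).getD k d0
      = (l.filter (fun b => key b == k)).foldl (fun v b => g b v) (d.getD k d0) := by
  induction l generalizing d with
  | nil => simp
  | cons b l ih =>
    simp only [List.foldl_cons, List.filter_cons]
    rw [ih, PySem.Dict.getD_modify]
    by_cases h : k = key b
    · simp [h]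
    · rw [if_neg h, if_neg (fun hh : (key b == k) = true => h (eq_of_beq hh).symm)]

-- a dict with Nodup keys is keys paired with their getD values
theorem pv_items_eq_keys_map {κ ν : Type} [BEq κ] [LawfulBEq κ]
    (d : PySem.Dict κ ν) (d0 : ν) (h : d.keys.Nodup) :
    d.items = d.keys.map (fun k => (k, d.getD k d0)) := by
  simp only [PySem.Dict.keys, List.map_map]
  have hc : ∀ p ∈ d.items, ((fun k => (k, d.getD k d0)) ∘ (fun p => p.1)) p = id p := by
    intro p hp
    obtain ⟨k, v⟩ := p
    simp [PySem.Dict.getD_of_mem_items d hp h d0]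
  rw [List.map_congr_left hc, List.map_id]

-- iterated Set.update along a list is one update by the flatMap
theorem pv_foldl_update_eq_update_flatMap {α β : Type} [BEq α]
    (ns : β → List α) (l : List β) (s : PySem.Set α) :
    l.foldl (fun v b => PySem.Set.update v (ns b)) s = PySem.Set.update s (l.flatMap ns) := by
  induction l generalizing s with
  | nil => simp [PySem.Set.update]
  | cons b l ih => simp only [List.foldl_cons, List.flatMap_cons, PySem.Set.update_append, ih]

-- filter commutes with first-occurrence dedup
theorem pv_ofList_filter {α : Type} [BEq α] [LawfulBEq α] (q : α → Bool) (xs : List α) :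
    (PySem.Set.ofList xs).filter q = PySem.Set.ofList (xs.filter q) := by
  induction xs with
  | nil => simp [PySem.Set.ofList]
  | cons x xs ih =>
    by_cases hq : q x = true
    · conv_rhs => rw [List.filter_cons_of_pos hq, PySem.Set.ofList_cons]
      rw [PySem.Set.ofList_cons, List.filter_cons_of_pos hq]
      congr 1
      rw [← ih]
      simp only [PySem.Set.discard, List.filter_filter]
      exact List.filter_congr fun y _ => by rw [Bool.and_comm]
    · conv_rhs => rw [List.filter_cons_of_neg hq]
      rw [PySem.Set.ofList_cons, List.filter_cons_of_neg hq, ← ih]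
      simp only [PySem.Set.discard, List.filter_filter]
      refine List.filter_congr fun y _ => ?_
      by_cases hy : y = x
      · subst hy; simp [hq]
      · simp [hy]

-- dedupping before mapping does not change the dedup of the image
theorem pv_ofList_map_ofList {α β : Type} [BEq α] [LawfulBEq α] [BEq β] [LawfulBEq β]
    (f : α → β) (xs : List α) :
    PySem.Set.ofList ((PySem.Set.ofList xs).map f) = PySem.Set.ofList (xs.map f) := by
  have main : ∀ n (xs : List α), xs.length ≤ n →
      PySem.Set.ofList ((PySem.Set.ofList xs).map f) = PySem.Set.ofList (xs.map f) := by
    intro n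
    induction n with
    | zero => intro xs hx; rw [List.length_eq_zero_iff.mp (Nat.le_zero.mp hx)]; rfl
    | succ n ih =>
      intro xs hx
      match xs with
      | [] => rfl
      | x :: xs =>
        rw [PySem.Set.ofList_cons, List.map_cons, PySem.Set.ofList_cons,
            List.map_cons, PySem.Set.ofList_cons]
        congr 1
        simp only [PySem.Set.discard]
        have h1 : ((PySem.Set.ofList xs).filter (fun y => !y == x)).filter ((fun y => !y == f x) ∘ f)
            = (PySem.Set.ofList xs).filter ((fun y => !y == f x) ∘ f) := by
          rw [List.filter_filter]
          refine List.filter_congr fun y _ => ?_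
          by_cases hy : y = x
          · subst hy; simp [Function.comp]
          · by_cases hf : f y = f x <;> simp [Function.comp, hy, hf]
        have hlen : (xs.filter ((fun y => !y == f x) ∘ f)).length ≤ n :=
          le_trans (List.length_filter_le _ _) (Nat.le_of_succ_le_succ hx)
        conv_lhs => rw [pv_ofList_filter, List.filter_map, h1, pv_ofList_filter]
        conv_rhs => rw [pv_ofList_filter, List.filter_map]
        exact ih _ hlen
  exact main xs.length xs le_rfl

-- a map that is injective on the members commutes with first-occurrence dedup
theorem pv_map_ofList_inj {α β : Type} [BEq α] [LawfulBEq α] [BEq β] [LawfulBEq β]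
    (f : α → β) (xs : List α) (hinj : ∀ a ∈ xs, ∀ b ∈ xs, f a = f b → a = b) :
    (PySem.Set.ofList xs).map f = PySem.Set.ofList (xs.map f) := by
  induction xs with
  | nil => rfl
  | cons x xs ih =>
    rw [PySem.Set.ofList_cons, List.map_cons, List.map_cons, PySem.Set.ofList_cons]
    congr 1
    have ih' := ih (fun a ha b hb => hinj a (List.mem_cons_of_mem x ha) b (List.mem_cons_of_mem x hb))
    simp only [PySem.Set.discard]
    rw [← ih', List.filter_map]
    refine congrArg (List.map f) (List.filter_congr fun y hy => ?_)
    have hyx : y ∈ x :: xs := List.mem_cons_of_mem x ((PySem.Set.mem_ofList xs y).mp hy)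
    by_cases h : y = x
    · subst h; simp [Function.comp]
    · have hf : f y ≠ f x := fun hf => h (hinj y hyx x List.mem_cons_self hf)
      simp [Function.comp, h, hf]

-- characterization of A's first pass (grouped): items = deduped triples paired with the
-- set of all targets of the matching rows
theorem pvA_grouped_items (T : List (String × String × String × List String)) :
    (T.foldl (fun g e => g.modify (e.1, e.2.1, e.2.2.1) PySem.Set.empty (fun s => PySem.Set.update s e.2.2.2)) PySem.Dict.empty).items
      = (PySem.Set.ofList (T.map fun e => (e.1, e.2.1, e.2.2.1))).map
          (fun k => (k, PySem.Set.ofList ((T.filter (fun e => (e.1, e.2.1, e.2.2.1) == k)).flatMap (fun e => e.2.2.2)))) := by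
  have hk : (T.foldl (fun g e => g.modify (e.1, e.2.1, e.2.2.1) PySem.Set.empty (fun s => PySem.Set.update s e.2.2.2)) PySem.Dict.empty).keys
      = PySem.Set.ofList (T.map fun e => (e.1, e.2.1, e.2.2.1)) := by
    have := PySem.Dict.keys_foldl_modify_key T (fun e => (e.1, e.2.1, e.2.2.1)) PySem.Set.empty
      (fun _ e s => PySem.Set.update s e.2.2.2) PySem.Dict.empty
    simpa [PySem.Set.update_nil_left] using this
  rw [pv_items_eq_keys_map _ PySem.Set.empty (by rw [hk]; exact PySem.Set.nodup_ofList _), hk]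
  refine List.map_congr_left fun k _ => ?_
  have hg := pv_getD_foldl_modify_key T (fun e => (e.1, e.2.1, e.2.2.1)) PySem.Set.empty
    (fun e s => PySem.Set.update s e.2.2.2) PySem.Dict.empty k
  simp only [PySem.Dict.getD_empty] at hg
  rw [hg, pv_foldl_update_eq_update_flatMap, PySem.Set.update_empty]

-- characterization of A's second pass
theorem pvA_st_items (l : List ((String × String × String) × PySem.Set String)) :
    (l.foldl (fun d q => d.modify (q.1.1, q.1.2.1) [] (fun t => t ++ [(q.1.2.2, q.2)])) PySem.Dict.empty).items
      = (PySem.Set.ofList (l.map fun q => (q.1.1, q.1.2.1))).map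
          (fun p => (p, (l.filter (fun q => (q.1.1, q.1.2.1) == p)).map (fun q => (q.1.2.2, q.2)))) := by
  have hk : (l.foldl (fun d q => d.modify (q.1.1, q.1.2.1) [] (fun t => t ++ [(q.1.2.2, q.2)])) PySem.Dict.empty).keys
      = PySem.Set.ofList (l.map fun q => (q.1.1, q.1.2.1)) := by
    have := PySem.Dict.keys_foldl_modify_key l (fun q => (q.1.1, q.1.2.1)) []
      (fun _ q t => t ++ [(q.1.2.2, q.2)]) PySem.Dict.empty
    simpa [PySem.Set.update_nil_left] using this
  rw [pv_items_eq_keys_map _ [] (by rw [hk]; exact PySem.Set.nodup_ofList _), hk]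
  refine List.map_congr_left fun p _ => ?_
  have hg := pv_getD_foldl_modify_key l (fun q => (q.1.1, q.1.2.1)) []
    (fun q t => t ++ [(q.1.2.2, q.2)]) PySem.Dict.empty p
  simp only [PySem.Dict.getD_empty] at hg
  rw [hg, PySem.List.foldl_append_singleton_eq_map, List.nil_append]

-- characterization of B: the foldl-insert over fresh deduped keys is a map
theorem pvB_items (T : List (String × String × String × List String)) :
    convert_alt T
      = (PySem.Set.ofList (T.map fun e => (e.1, e.2.1))).map (fun p => (p.1, p.2,
          (PySem.Set.ofList (((T.filter (fun e => (e.1, e.2.1) == p)).map (fun e => (e.2.2.1, e.2.2.2))).map (fun r => r.1))).map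
            (fun c => (c, PySem.Set.ofList ((((T.filter (fun e => (e.1, e.2.1) == p)).map (fun e => (e.2.2.1, e.2.2.2))).filter
                (fun r => r.1 == c)).flatMap (fun r => r.2)))))) := by
  simp only [convert_alt, PySem.List.dedup_eq_ofList]
  have hfresh : ∀ p ∈ PySem.Set.ofList (T.map fun e => (e.1, e.2.1)),
      (PySem.Dict.empty (κ := String × String) (ν := List (String × PySem.Set String))).contains p = false := by
    intro p _; simp
  have hnd : ((PySem.Set.ofList (T.map fun e => (e.1, e.2.1))).map (fun p => p)).Nodup := by
    simp only [List.map_id_fun', id]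
    exact PySem.Set.nodup_ofList (T.map fun e => (e.1, e.2.1))
  rw [PySem.Dict.items_foldl_insert_fresh _ (fun p => p) _ _ hfresh hnd]
  simp only [PySem.Dict.empty, List.nil_append, List.map_map]
  rfl

-- the per-pair value of A equals the per-pair value of B
theorem pv_per_pair (T : List (String × String × String × List String)) (p1 p2 : String) :
    ((((PySem.Set.ofList (T.map fun e => (e.1, e.2.1, e.2.2.1))).map
        (fun k => (k, PySem.Set.ofList ((T.filter (fun e => (e.1, e.2.1, e.2.2.1) == k)).flatMap (fun e => e.2.2.2))))).filter
          (fun q => (q.1.1, q.1.2.1) == (p1, p2))).map (fun q => (q.1.2.2, q.2)))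
      = (PySem.Set.ofList (((T.filter (fun e => (e.1, e.2.1) == (p1, p2))).map (fun e => (e.2.2.1, e.2.2.2))).map (fun r => r.1))).map
          (fun c => (c, PySem.Set.ofList ((((T.filter (fun e => (e.1, e.2.1) == (p1, p2))).map (fun e => (e.2.2.1, e.2.2.2))).filter
              (fun r => r.1 == c)).flatMap (fun r => r.2)))) := by
  rw [List.filter_map, List.map_map, pv_ofList_filter, List.filter_map]
  -- everything below is up to beta/comp definitional unfolding
  show (PySem.Set.ofList ((T.filter (fun e => (e.1, e.2.1) == (p1, p2))).map (fun e => (e.1, e.2.1, e.2.2.1)))).map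
      (fun k => (k.2.2, PySem.Set.ofList ((T.filter (fun e => (e.1, e.2.1, e.2.2.1) == k)).flatMap (fun e => e.2.2.2)))) = _
  have hmemS : ∀ k ∈ PySem.Set.ofList ((T.filter (fun e => (e.1, e.2.1) == (p1, p2))).map (fun e => (e.1, e.2.1, e.2.2.1))),
      k.1 = p1 ∧ k.2.1 = p2 := by
    intro k hk
    obtain ⟨e, he, rfl⟩ := List.mem_map.mp ((PySem.Set.mem_ofList _ _).mp hk)
    have := List.of_mem_filter he
    have hpe : (e.1, e.2.1) = (p1, p2) := eq_of_beq this
    exact ⟨congrArg Prod.fst hpe, congrArg Prod.snd hpe⟩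
  have hmem : ∀ k ∈ PySem.Set.ofList ((T.filter (fun e => (e.1, e.2.1) == (p1, p2))).map (fun e => (e.1, e.2.1, e.2.2.1))),
      (fun (k : String × String × String) =>
        (k.2.2, PySem.Set.ofList ((T.filter (fun e => (e.1, e.2.1, e.2.2.1) == k)).flatMap (fun e => e.2.2.2)))) k
      = ((fun c => (c, PySem.Set.ofList ((T.filter (fun e => (e.1, e.2.1, e.2.2.1) == (p1, p2, c))).flatMap (fun e => e.2.2.2)))) ∘
          (fun (k : String × String × String) => k.2.2)) k := by
    intro k hk
    obtain ⟨h1, h2⟩ := hmemS k hk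
    have hkk : k = (p1, p2, k.2.2) := Prod.ext h1 (Prod.ext h2 rfl)
    exact congrArg (fun t => (k.2.2, PySem.Set.ofList ((T.filter (fun e => (e.1, e.2.1, e.2.2.1) == t)).flatMap (fun e => e.2.2.2)))) hkk
  rw [List.map_congr_left hmem, ← List.map_map]
  have hinj : ∀ a ∈ (T.filter (fun e => (e.1, e.2.1) == (p1, p2))).map (fun e => (e.1, e.2.1, e.2.2.1)),
      ∀ b ∈ (T.filter (fun e => (e.1, e.2.1) == (p1, p2))).map (fun e => (e.1, e.2.1, e.2.2.1)),
      (fun (k : String × String × String) => k.2.2) a = (fun (k : String × String × String) => k.2.2) b → a = b := by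
    intro a ha b hb hab
    have haS := hmemS a (by rw [PySem.Set.mem_ofList]; exact ha)
    have hbS := hmemS b (by rw [PySem.Set.mem_ofList]; exact hb)
    exact Prod.ext (haS.1.trans hbS.1.symm) (Prod.ext (haS.2.trans hbS.2.symm) hab)
  rw [pv_map_ofList_inj _ _ hinj, List.map_map]
  conv_rhs => rw [List.map_map]
  refine List.map_congr_left fun c _ => ?_
  refine congrArg (Prod.mk c) ?_
  rw [List.filter_map, List.flatMap_map]
  show PySem.Set.ofList ((T.filter (fun e => (e.1, e.2.1, e.2.2.1) == (p1, p2, c))).flatMap (fun e => e.2.2.2))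
    = PySem.Set.ofList (((T.filter (fun e => (e.1, e.2.1) == (p1, p2))).filter (fun e => e.2.2.1 == c)).flatMap (fun e => e.2.2.2))
  rw [List.filter_filter]
  refine congrArg _ (congrArg _ (List.filter_congr fun e _ => ?_))
  rw [Bool.eq_iff_iff]
  simp only [beq_iff_eq, Bool.and_eq_true, Prod.mk.injEq]
  tauto

-- main equivalence
theorem pv_convert_eq (T : List (String × String × String × List String)) :
    convert T = convert_alt T := by
  simp only [convert]
  rw [pvA_grouped_items, pvA_st_items, pvB_items]
  have houter : PySem.Set.ofList (((PySem.Set.ofList (T.map fun e => (e.1, e.2.1, e.2.2.1))).map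
        (fun k => (k, PySem.Set.ofList ((T.filter (fun e => (e.1, e.2.1, e.2.2.1) == k)).flatMap (fun e => e.2.2.2))))).map
          (fun q => (q.1.1, q.1.2.1)))
      = PySem.Set.ofList (T.map fun e => (e.1, e.2.1)) := by
    rw [List.map_map]
    have hcomp : ((fun (q : (String × String × String) × PySem.Set String) => (q.1.1, q.1.2.1)) ∘
        (fun k => (k, PySem.Set.ofList ((T.filter (fun e => (e.1, e.2.1, e.2.2.1) == k)).flatMap (fun e => e.2.2.2)))))
        = fun (k : String × String × String) => (k.1, k.2.1) := rfl
    rw [hcomp, pv_ofList_map_ofList, List.map_map]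
    rfl
  rw [houter, List.map_map]
  refine List.map_congr_left fun p _ => ?_
  obtain ⟨p1, p2⟩ := p
  show (p1, p2, _) = (p1, p2, _)
  exact congrArg (fun v => (p1, p2, v)) (pv_per_pair T p1 p2)

-- ===== VERDICT (by name: the statement is the Claim_ definition above) =====
theorem convert_spec : Claim_equal_convert := by
  intro T _
  show convert T = convert_alt T
  exact pv_convert_eq T
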